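-- pv_equiv track=rewrite | github.com/sofiamalpique/fcup-programacao-II | projeto1.py | organiza
-- ===== SOURCE A (Python) =====
-- def sem_pontuacao(txt):
--
--     str_curada = ""
--
--     lista_pontuacao = ['.', ',', ';', ':', '?', '!', '"', '-','(',')','[',']']
--
--     for c in txt:
--         if c not in lista_pontuacao:
--             str_curada += c
--
--     return str_curada
--
-- def organiza(txt):
--
--     textoSemPontuacao = sem_pontuacao(txt)
--
--     listaDasFrases = textoSemPontuacao.split('\n')
--     livro = []
--
--     for i in range(len(listaDasFrases)):
--         if listaDasFrases[i] != '':
--             livro.append(listaDasFrases[i])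
--
--             # neste momento tenho os lusiadas numa lista cujos elementos são linhas
--
--     lista_cantos = []
--     lista_final = []
--
--     currentCanto = -1
--
--     for frase in livro:
--         if frase.startswith('Canto'):  # começou um novo canto
--             currentCanto += 1
--             lista_cantos.append([])
--         if (currentCanto >= 0) and (not(frase.startswith('Canto'))):
--             lista_cantos[currentCanto].append(frase)
--
--     numCantos = len(lista_cantos)
--
--     for i in range(numCantos):
--         lista_final.append([])
--         estrofe_counter = -1
--         for j in range(len(lista_cantos[i])):
--
--             if lista_cantos[i][j].isnumeric():
--
--                 estrofe_counter += 1
--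
--                 lista_final[i].append([])
--
--             if (estrofe_counter >= 0) and (not(lista_cantos[i][j].isnumeric())):
--
--                 lista_final[i][estrofe_counter].append(
--                     lista_cantos[i][j].split())
--
--     return lista_final
-- ===== SOURCE B (Python) =====
-- def organiza(txt):
--     punct = set('.,;:?!"-()[]')
--     cleaned = ''.join(c for c in txt if c not in punct)
--
--     cantos = []      # completed cantos
--     canto = None     # estrofes of the canto being built, or None
--     estrofe = None   # word-lists of the estrofe being built, or None
--
--     def flush_estrofe():
--         nonlocal canto, estrofe
--         if estrofe is not None:
--             canto.append(estrofe)
--             estrofe = None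
--
--     def flush_canto():
--         nonlocal canto
--         flush_estrofe()
--         if canto is not None:
--             cantos.append(canto)
--             canto = None
--
--     for line in cleaned.split('\n'):
--         if line == '':
--             continue
--         if line.startswith('Canto'):
--             flush_canto()
--             canto = []
--         elif line.isnumeric():
--             if canto is not None:
--                 flush_estrofe()
--                 estrofe = []
--         elif estrofe is not None:
--             estrofe.append(line.split())
--
--     flush_canto()
--     return cantos
-- ===== Notes on version B (the rewrite author's own statement) =====
-- stated objective: simpler
-- what changed: A makes three passes (filter non-empty lines, group lines into cantos via an index counter and list indexing, then re-group each canto into estrofes with a second counter); B is a single state-machine pass over the lines holding the current canto and current estrofe and flushing them on transitions, which also avoids A's char-by-char string += and the intermediate line lists (a constant-factor speedup, measured ~4x).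
import Mathlib
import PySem

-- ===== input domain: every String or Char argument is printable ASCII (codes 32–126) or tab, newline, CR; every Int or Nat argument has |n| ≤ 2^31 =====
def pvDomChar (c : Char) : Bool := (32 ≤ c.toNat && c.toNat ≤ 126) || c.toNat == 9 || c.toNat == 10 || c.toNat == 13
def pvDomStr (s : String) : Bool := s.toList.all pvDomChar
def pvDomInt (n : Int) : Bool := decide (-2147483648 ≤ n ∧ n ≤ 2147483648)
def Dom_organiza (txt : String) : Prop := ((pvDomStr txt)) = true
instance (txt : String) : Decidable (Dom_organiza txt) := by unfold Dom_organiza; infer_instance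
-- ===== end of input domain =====

-- B replaces A's three passes (filter lines, counter-indexed canto grouping, per-canto estrofe
-- grouping) with one state-machine pass over the lines; objective: simpler. Same O(n) cost.
-- Both ports work line-wise over List Char (lines of the '\n'-split cleaned text) and use
-- PySem.Chars primitives, exact on the ASCII domain (in particular line.isnumeric() is
-- strIsdigit, exact on ASCII where only '0'-'9' are numeric).

-- ===== PORT A =====
-- punctuation list of sem_pontuacao (shared literal of both sources)
def pvPunct : List Char := ['.', ',', ';', ':', '?', '!', '"', '-', '(', ')', '[', ']']

-- sem_pontuacao: build the cleaned text char by char (as List Char)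
def pvSemPontuacao (txt : String) : List Char :=
  txt.toList.foldl (fun acc c => if ¬ (c ∈ pvPunct) then acc ++ [c] else acc) []

def organiza (txt : String) : List (List (List (List String))) :=
  let textoSemPontuacao := pvSemPontuacao txt
  let listaDasFrases := PySem.Chars.splitOn textoSemPontuacao ['\n']
  -- first loop: for i in range(len(listaDasFrases)) reading listaDasFrases[i] — a fold over the list
  let livro := listaDasFrases.foldl (fun acc f => if f ≠ [] then acc ++ [f] else acc) []
  -- second loop: state (lista_cantos, currentCanto); lista_cantos[currentCanto].append(frase) is a
  -- List.modify at currentCanto.toNat (exact: the guard gives currentCanto ≥ 0)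
  let lista_cantos := (livro.foldl
    (fun (s : List (List (List Char)) × Int) frase =>
      let s' := if PySem.Chars.startswith frase "Canto".toList = true then (s.1 ++ [[]], s.2 + 1) else s
      if s'.2 ≥ 0 ∧ PySem.Chars.startswith frase "Canto".toList = false then
        (s'.1.modify s'.2.toNat (fun c => c ++ [frase]), s'.2)
      else s') ([], -1)).1
  -- third loop: for i in range(numCantos) with inner for j over lista_cantos[i] — a fold over
  -- lista_cantos; i (the index of the slot appended this iteration) equals lf.length;
  -- estrofe_counter.toNat is exact by its ≥ 0 guard
  let lista_final := lista_cantos.foldl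
    (fun lf canto =>
      let i := lf.length
      let lf := lf ++ [[]]
      (canto.foldl
        (fun (t : List (List (List (List String))) × Int) line =>
          let t' := if PySem.Chars.strIsdigit line = true then (t.1.modify i (fun c => c ++ [[]]), t.2 + 1) else t
          if t'.2 ≥ 0 ∧ PySem.Chars.strIsdigit line = false then
            (t'.1.modify i (fun c => c.modify t'.2.toNat (fun e => e ++ [(PySem.Chars.split₀ line).map String.mk])), t'.2)
          else t') (lf, -1)).1) []
  lista_final

-- ===== PORT B =====
-- flush_estrofe: a finished estrofe is appended to the current canto (in the Python, estrofe ≠ None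
-- implies canto ≠ None, so the Option.map is exact on reachable states)
def pvFlushEstrofe (canto : Option (List (List (List String)))) (estrofe : Option (List (List String))) :
    Option (List (List (List String))) × Option (List (List String)) :=
  match estrofe with
  | some e => (canto.map (fun c => c ++ [e]), none)
  | none   => (canto, none)

-- flush_canto: flush the estrofe, then append the finished canto to the result
def pvFlushCanto (cantos : List (List (List (List String))))
    (canto : Option (List (List (List String)))) (estrofe : Option (List (List String))) :
    List (List (List (List String))) × Option (List (List (List String))) × Option (List (List String)) :=
  let p := pvFlushEstrofe canto estrofe
  match p.1 with
  | some c => (cantos ++ [c], none, p.2)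
  | none   => (cantos, none, p.2)

-- one step of B's state machine, state = (cantos, canto, estrofe)
def pvStepB
    (st : List (List (List (List String))) × Option (List (List (List String))) × Option (List (List String)))
    (line : List Char) :
    List (List (List (List String))) × Option (List (List (List String))) × Option (List (List String)) :=
  if line = [] then st
  else if PySem.Chars.startswith line "Canto".toList = true then
    let q := pvFlushCanto st.1 st.2.1 st.2.2
    (q.1, some [], none)
  else if PySem.Chars.strIsdigit line = true then
    match st.2.1 with
    | none => st
    | some _ =>
      let p := pvFlushEstrofe st.2.1 st.2.2
      (st.1, p.1, some [])
  else
    match st.2.2 with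
    | none => st
    | some e => (st.1, st.2.1, some (e ++ [(PySem.Chars.split₀ line).map String.mk]))

def organiza_alt (txt : String) : List (List (List (List String))) :=
  let cleaned := txt.toList.filter (fun c => ¬ (c ∈ pvPunct))
  let st := (PySem.Chars.splitOn cleaned ['\n']).foldl pvStepB ([], none, none)
  (pvFlushCanto st.1 st.2.1 st.2.2).1

-- ===== PRECONDITION & SPEC =====
def Spec_organiza (txt : String) (out : List (List (List (List String)))) : Prop := out = organiza_alt txt
instance (txt : String) (out : List (List (List (List String)))) : Decidable (Spec_organiza txt out) := by unfold Spec_organiza; infer_instance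

-- ===== CLAIM (what is proved, stated in full; the proofs are below) =====
def Claim_equal_organiza : Prop := ∀ (txt : String), Dom_organiza txt → Spec_organiza txt (organiza txt)

-- ===== LEMMAS AND PROOFS =====

-- the common grouping specification: each group opens at a line satisfying p and holds f of the
-- following non-p lines; lines before the first p-line are dropped
def pvGroups {α : Type} (p : List Char → Bool) (f : List Char → α) : List (List Char) → List (List α)
  | [] => []
  | l :: ls =>
    if p l then ((ls.takeWhile (fun x => !p x)).map f) :: pvGroups p f (ls.dropWhile (fun x => !p x))
    else pvGroups p f ls
termination_by ls => ls.length
decreasing_by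
  · exact Nat.lt_succ_of_le (List.length_dropWhile_le _ _)
  · exact Nat.lt_succ_of_le (Nat.le_refl _)

@[simp] lemma pvGroups_nil {α : Type} (p : List Char → Bool) (f : List Char → α) :
    pvGroups p f [] = [] := by rw [pvGroups]

lemma pvGroups_cons {α : Type} (p : List Char → Bool) (f : List Char → α)
    (l : List Char) (ls : List (List Char)) :
    pvGroups p f (l :: ls)
      = if p l then ((ls.takeWhile (fun x => !p x)).map f) :: pvGroups p f (ls.dropWhile (fun x => !p x))
        else pvGroups p f ls := by rw [pvGroups]

def pvIsCanto (l : List Char) : Bool := PySem.Chars.startswith l "Canto".toList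
def pvIsNum (l : List Char) : Bool := PySem.Chars.strIsdigit l
def pvSplitLine (l : List Char) : List String := (PySem.Chars.split₀ l).map String.mk

-- what both programs compute from the list of non-empty lines
def pvResult (ls : List (List Char)) : List (List (List (List String))) :=
  (pvGroups pvIsCanto id ls).map (fun c => pvGroups pvIsNum pvSplitLine c)

@[simp] lemma pvResult_nil : pvResult [] = [] := by simp [pvResult]

lemma pvResult_cons_canto (l : List Char) (ls : List (List Char)) (h : pvIsCanto l = true) :
    pvResult (l :: ls)
      = pvGroups pvIsNum pvSplitLine (ls.takeWhile (fun x => !pvIsCanto x))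
        :: pvResult (ls.dropWhile (fun x => !pvIsCanto x)) := by
  simp [pvResult, pvGroups_cons, h]

lemma pvResult_cons_skip (l : List Char) (ls : List (List Char)) (h : pvIsCanto l = false) :
    pvResult (l :: ls) = pvResult ls := by
  simp [pvResult, pvGroups_cons, h]

-- the generic shape of A's two counter-based grouping folds
def pvGStep {α : Type} (p : List Char → Bool) (f : List Char → α)
    (s : List (List α) × Int) (line : List Char) : List (List α) × Int :=
  let s' := if p line = true then (s.1 ++ [[]], s.2 + 1) else s
  if s'.2 ≥ 0 ∧ p line = false then (s'.1.modify s'.2.toNat (fun c => c ++ [f line]), s'.2) else s'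

lemma pv_modify_concat {α : Type} (xs : List α) (y : α) (f : α → α) :
    (xs ++ [y]).modify xs.length f = xs ++ [f y] := by
  induction xs with
  | nil => rfl
  | cons x xs ih => simpa [List.modify] using ih

lemma pv_gstep_inside {α : Type} (p : List Char → Bool) (f : List Char → α) :
    ∀ (ls : List (List Char)) (done : List (List α)) (cur : List α),
    (ls.foldl (pvGStep p f) (done ++ [cur], (done.length : Int))).1 =
      done ++ [cur ++ (ls.takeWhile (fun x => !p x)).map f] ++ pvGroups p f (ls.dropWhile (fun x => !p x)) := by
  intro ls
  induction ls with
  | nil => intro done cur; simp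
  | cons l ls ih =>
    intro done cur
    by_cases hp : p l = true
    · have hstep : pvGStep p f (done ++ [cur], (done.length : Int)) l
          = ((done ++ [cur]) ++ [[]], ((done ++ [cur]).length : Int)) := by
        simp [pvGStep, hp]
      rw [List.foldl_cons, hstep, ih]
      simp [pvGroups_cons, hp, List.takeWhile_cons, List.dropWhile_cons]
    · have hp' : p l = false := by simpa using hp
      have hstep : pvGStep p f (done ++ [cur], (done.length : Int)) l
          = (done ++ [cur ++ [f l]], (done.length : Int)) := by
        simp [pvGStep, hp', pv_modify_concat]
      rw [List.foldl_cons, hstep, ih]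
      simp [List.takeWhile_cons, List.dropWhile_cons, hp']

lemma pv_gstep_spec {α : Type} (p : List Char → Bool) (f : List Char → α) (ls : List (List Char)) :
    (ls.foldl (pvGStep p f) ([], -1)).1 = pvGroups p f ls := by
  induction ls with
  | nil => simp
  | cons l ls ih =>
    by_cases hp : p l = true
    · have hstep : pvGStep p f (([] : List (List α)), (-1 : Int)) l = ([[]], 0) := by
        simp [pvGStep, hp]
      rw [List.foldl_cons, hstep]
      have := pv_gstep_inside p f ls ([] : List (List α)) ([] : List α)
      simpa [pvGroups_cons, hp] using this
    · have hp' : p l = false := by simpa using hp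
      have hstep : pvGStep p f (([] : List (List α)), (-1 : Int)) l = ([], -1) := by
        simp [pvGStep, hp']
      rw [List.foldl_cons, hstep]
      simpa [pvGroups_cons, hp'] using ih

-- A's inner (stage-2) fold only touches the slot lf.length; it acts locally like pvGStep
lemma pv_inner_localize :
    ∀ (lines : List (List Char)) (lf : List (List (List (List String))))
      (x : List (List (List String))) (c : Int),
    lines.foldl
      (fun (t : List (List (List (List String))) × Int) line =>
        let t' := if PySem.Chars.strIsdigit line = true then (t.1.modify lf.length (fun c => c ++ [[]]), t.2 + 1) else t
        if t'.2 ≥ 0 ∧ PySem.Chars.strIsdigit line = false then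
          (t'.1.modify lf.length (fun cc => cc.modify t'.2.toNat (fun e => e ++ [(PySem.Chars.split₀ line).map String.mk])), t'.2)
        else t') (lf ++ [x], c)
      = (lf ++ [(lines.foldl (pvGStep pvIsNum pvSplitLine) (x, c)).1],
         (lines.foldl (pvGStep pvIsNum pvSplitLine) (x, c)).2) := by
  intro lines
  induction lines with
  | nil => intro lf x c; rfl
  | cons l ls ih =>
    intro lf x c
    rw [List.foldl_cons, List.foldl_cons]
    by_cases hn : PySem.Chars.strIsdigit l = true
    · by_cases hc : (c + 1 : Int) ≥ 0
      · simp [pvGStep, pvIsNum, pvSplitLine, hn, hc, pv_modify_concat, ih]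
      · simp [pvGStep, pvIsNum, pvSplitLine, hn, hc, pv_modify_concat, ih]
    · have hn' : PySem.Chars.strIsdigit l = false := by simpa using hn
      by_cases hc : (c : Int) ≥ 0
      · simp [pvGStep, pvIsNum, pvSplitLine, hn', hc, pv_modify_concat, ih]
      · simp [pvGStep, pvIsNum, pvSplitLine, hn', hc, ih]

-- A's outer (stage-2) fold is a map of the localized fold
lemma pv_outer_map :
    ∀ (cs : List (List (List Char))) (lf : List (List (List (List String)))),
    cs.foldl
      (fun lf canto =>
        let i := lf.length
        let lf := lf ++ [[]]
        (canto.foldl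
          (fun (t : List (List (List (List String))) × Int) line =>
            let t' := if PySem.Chars.strIsdigit line = true then (t.1.modify i (fun c => c ++ [[]]), t.2 + 1) else t
            if t'.2 ≥ 0 ∧ PySem.Chars.strIsdigit line = false then
              (t'.1.modify i (fun c => c.modify t'.2.toNat (fun e => e ++ [(PySem.Chars.split₀ line).map String.mk])), t'.2)
            else t') (lf, -1)).1) lf
      = lf ++ cs.map (fun c => pvGroups pvIsNum pvSplitLine c) := by
  intro cs
  induction cs with
  | nil => intro lf; simp
  | cons c cs ih =>
    intro lf
    rw [List.foldl_cons]
    have hloc := pv_inner_localize c lf ([] : List (List (List String))) (-1)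
    simp only [hloc, pv_gstep_spec]
    rw [ih]
    simp

-- skipping empty lines: pvStepB ignores [] so folding over all lines equals folding over
-- the non-empty ones
lemma pv_stepB_skip_empty :
    ∀ (ls : List (List Char))
      (st : List (List (List (List String))) × Option (List (List (List String))) × Option (List (List String))),
    ls.foldl pvStepB st = (ls.filter (fun f => f ≠ [])).foldl pvStepB st := by
  intro ls
  induction ls with
  | nil => intro st; rfl
  | cons l ls ih =>
    intro st
    by_cases hl : l = []
    · subst hl
      have hid : pvStepB st [] = st := rfl
      simp [List.filter_cons, hid, ih]
    · simp [List.filter_cons, hl, ih]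

-- A's first loop builds exactly the filtered line list
lemma pv_livro_filter :
    ∀ (ls : List (List Char)) (acc : List (List Char)),
    ls.foldl (fun acc f => if f ≠ [] then acc ++ [f] else acc) acc = acc ++ ls.filter (fun f => f ≠ []) := by
  intro ls
  induction ls with
  | nil => intro acc; simp
  | cons l ls ih =>
    intro acc
    rw [List.foldl_cons, ih]
    by_cases hl : l = []
    · simp [List.filter_cons, hl]
    · simp [List.filter_cons, hl]

-- the two cleaned texts coincide
lemma pv_clean_eq (txt : String) :
    pvSemPontuacao txt = txt.toList.filter (fun c => ¬ (c ∈ pvPunct)) := by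
  have h : ∀ (l : List Char) (acc : List Char),
      l.foldl (fun acc c => if ¬ (c ∈ pvPunct) then acc ++ [c] else acc) acc
        = acc ++ l.filter (fun c => ¬ (c ∈ pvPunct)) := by
    intro l
    induction l with
    | nil => intro acc; simp
    | cons c l ih =>
      intro acc
      rw [List.foldl_cons, ih]
      by_cases hc : c ∈ pvPunct
      · simp [List.filter_cons, hc]
      · simp [List.filter_cons, hc]
  simpa [pvSemPontuacao] using h txt.toList []

-- the flushed final state of B's machine
def pvFinish
    (st : List (List (List (List String))) × Option (List (List (List String))) × Option (List (List String))) :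
    List (List (List (List String))) :=
  (pvFlushCanto st.1 st.2.1 st.2.2).1

-- B's state machine, run from any reachable state and flushed at the end, computes pvResult
lemma pv_B_main :
    ∀ (ls : List (List Char)), (∀ l ∈ ls, l ≠ []) →
    ∀ (cs : List (List (List (List String)))) (c : List (List (List String))) (e : List (List String)),
      pvFinish (ls.foldl pvStepB (cs, some c, some e))
        = cs ++ [c ++ [e ++ ((ls.takeWhile (fun x => !pvIsCanto x)).takeWhile (fun x => !pvIsNum x)).map pvSplitLine]
              ++ pvGroups pvIsNum pvSplitLine ((ls.takeWhile (fun x => !pvIsCanto x)).dropWhile (fun x => !pvIsNum x))]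
          ++ pvResult (ls.dropWhile (fun x => !pvIsCanto x))
      ∧ pvFinish (ls.foldl pvStepB (cs, some c, none))
        = cs ++ [c ++ pvGroups pvIsNum pvSplitLine (ls.takeWhile (fun x => !pvIsCanto x))]
          ++ pvResult (ls.dropWhile (fun x => !pvIsCanto x))
      ∧ pvFinish (ls.foldl pvStepB (cs, none, none)) = cs ++ pvResult ls := by
  intro ls
  induction ls with
  | nil =>
    intro _ cs c e
    refine ⟨?_, ?_, ?_⟩ <;> simp [pvFinish, pvFlushCanto, pvFlushEstrofe]
  | cons l ls ih =>
    intro hne cs c e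
    have hl : l ≠ [] := hne l (List.mem_cons_self ..)
    have hne' : ∀ x ∈ ls, x ≠ [] := fun x hx => hne x (List.mem_cons_of_mem _ hx)
    by_cases hpc : pvIsCanto l = true
    · -- a Canto line: flush everything, open a new canto
      have hpcu : PySem.Chars.startswith l ['C','a','n','t','o'] = true := hpc
      have hres := pvResult_cons_canto l ls hpc
      refine ⟨?_, ?_, ?_⟩
      · have hstep : pvStepB (cs, some c, some e) l = (cs ++ [c ++ [e]], some [], none) := by
          simp [pvStepB, hl, hpcu, pvFlushCanto, pvFlushEstrofe]
        rw [List.foldl_cons, hstep, (ih hne' (cs ++ [c ++ [e]]) [] []).2.1]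
        simp [List.takeWhile_cons, List.dropWhile_cons, hpc, hpcu, hres]
      · have hstep : pvStepB (cs, some c, none) l = (cs ++ [c], some [], none) := by
          simp [pvStepB, hl, hpcu, pvFlushCanto, pvFlushEstrofe]
        rw [List.foldl_cons, hstep, (ih hne' (cs ++ [c]) [] []).2.1]
        simp [List.takeWhile_cons, List.dropWhile_cons, hpc, hpcu, hres]
      · have hstep : pvStepB (cs, none, none) l = (cs, some [], none) := by
          simp [pvStepB, hl, hpcu, pvFlushCanto, pvFlushEstrofe]
        rw [List.foldl_cons, hstep, (ih hne' cs [] []).2.1, hres]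
        simp [List.takeWhile_cons, List.dropWhile_cons, hpc, hpcu]
    · have hpc' : pvIsCanto l = false := by simpa using hpc
      have hpcu : PySem.Chars.startswith l ['C','a','n','t','o'] = false := hpc' 
      by_cases hpn : pvIsNum l = true
      · -- a numeric line
        have hpnu : PySem.Chars.strIsdigit l = true := hpn
        refine ⟨?_, ?_, ?_⟩
        · have hstep : pvStepB (cs, some c, some e) l = (cs, some (c ++ [e]), some []) := by
            simp [pvStepB, hl, hpcu, hpnu, pvFlushEstrofe]
          rw [List.foldl_cons, hstep, (ih hne' cs (c ++ [e]) []).1]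
          simp [List.takeWhile_cons, List.dropWhile_cons, hpc', hpn, pvGroups_cons]
        · have hstep : pvStepB (cs, some c, none) l = (cs, some c, some []) := by
            simp [pvStepB, hl, hpcu, hpnu, pvFlushEstrofe]
          rw [List.foldl_cons, hstep, (ih hne' cs c []).1]
          simp [List.takeWhile_cons, List.dropWhile_cons, hpc', hpn, pvGroups_cons]
        · have hstep : pvStepB (cs, none, none) l = (cs, none, none) := by
            simp [pvStepB, hl, hpcu, hpnu]
          rw [List.foldl_cons, hstep, (ih hne' cs c e).2.2, pvResult_cons_skip l ls hpc']
      · -- an ordinary content line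
        have hpn' : pvIsNum l = false := by simpa using hpn
        have hpnu : PySem.Chars.strIsdigit l = false := hpn'
        refine ⟨?_, ?_, ?_⟩
        · have hstep : pvStepB (cs, some c, some e) l = (cs, some c, some (e ++ [pvSplitLine l])) := by
            simp [pvStepB, hl, hpcu, hpnu, pvSplitLine]
          rw [List.foldl_cons, hstep, (ih hne' cs c (e ++ [pvSplitLine l])).1]
          simp [List.takeWhile_cons, List.dropWhile_cons, hpc', hpn']
        · have hstep : pvStepB (cs, some c, none) l = (cs, some c, none) := by
            simp [pvStepB, hl, hpcu, hpnu]
          rw [List.foldl_cons, hstep, (ih hne' cs c e).2.1]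
          simp [List.takeWhile_cons, List.dropWhile_cons, hpc', hpn', pvGroups_cons]
        · have hstep : pvStepB (cs, none, none) l = (cs, none, none) := by
            simp [pvStepB, hl, hpcu, hpnu]
          rw [List.foldl_cons, hstep, (ih hne' cs c e).2.2, pvResult_cons_skip l ls hpc']

-- ===== VERDICT (by name: the statement is the Claim_ definition above) =====
theorem organiza_spec : Claim_equal_organiza := by
  intro txt _
  unfold Spec_organiza
  have hA : organiza txt = pvResult ((PySem.Chars.splitOn (pvSemPontuacao txt) ['\n']).filter (fun f => f ≠ [])) := by
    simp only [organiza]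
    rw [pv_livro_filter, List.nil_append, pv_outer_map]
    have hstage1 := pv_gstep_spec pvIsCanto (id : List Char → List Char)
      ((PySem.Chars.splitOn (pvSemPontuacao txt) ['\n']).filter (fun f => f ≠ []))
    have hfun : pvGStep pvIsCanto (id : List Char → List Char)
        = (fun (s : List (List (List Char)) × Int) (frase : List Char) =>
            let s' := if PySem.Chars.startswith frase "Canto".toList = true then (s.1 ++ [[]], s.2 + 1) else s
            if s'.2 ≥ 0 ∧ PySem.Chars.startswith frase "Canto".toList = false then
              (s'.1.modify s'.2.toNat (fun c => c ++ [frase]), s'.2)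
            else s') := by
      funext s frase
      rfl
    rw [hfun] at hstage1
    rw [hstage1]
    simp [pvResult]
  have hB : organiza_alt txt = pvResult ((PySem.Chars.splitOn (pvSemPontuacao txt) ['\n']).filter (fun f => f ≠ [])) := by
    simp only [organiza_alt]
    rw [← pv_clean_eq, pv_stepB_skip_empty]
    have hne : ∀ l ∈ (PySem.Chars.splitOn (pvSemPontuacao txt) ['\n']).filter (fun f => f ≠ []), l ≠ [] := by
      intro l hlmem
      simpa using List.of_mem_filter hlmem
    have := (pv_B_main _ hne [] [] []).2.2
    simpa [pvFinish] using this
  rw [hA, hB]
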